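-- pv_equiv track=rewrite | github.com/SirZokxyron/Tetravex | environnement.py | combinaison_tab
-- ===== SOURCE A (Python) =====
-- def combinaison_tab(tab:list) -> list:
--     if len(tab) == 0:
--         return [[]]
--     elif len(tab) == 1:
--         return [[tab[0][0]], [tab[0][1]]]
--     v1 = tab.pop(0)
--     new_tab = [[v1[0]] for i in range(2 ** (len(tab)))]
--     new_tab += [[v1[1]] for i in range(2 ** (len(tab)))]
--     n = len(tab)
--     rec_tab = combinaison_tab(tab)
--     for v_i in range(len(new_tab)):
--         new_tab[v_i] += rec_tab[v_i % (2 ** n)]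
--     return new_tab
-- ===== SOURCE B (Python) =====
-- def combinaison_tab(tab: list) -> list:
--     result = [[]]
--     for pair in tab:
--         result = [r + [x] for r in result for x in (pair[0], pair[1])]
--     return result
-- ===== Notes on version B (the rewrite author's own statement) =====
-- stated objective: idiomatic
-- what changed: A builds the 2^n combinations by recursion with pop(0), replicated prefix rows and a modular-index patch loop; B is a single non-mutating left fold that extends every partial combination with the two choices of the next pair (return values identical; A empties tab down to its last pair while B leaves tab untouched).
import Mathlib
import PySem

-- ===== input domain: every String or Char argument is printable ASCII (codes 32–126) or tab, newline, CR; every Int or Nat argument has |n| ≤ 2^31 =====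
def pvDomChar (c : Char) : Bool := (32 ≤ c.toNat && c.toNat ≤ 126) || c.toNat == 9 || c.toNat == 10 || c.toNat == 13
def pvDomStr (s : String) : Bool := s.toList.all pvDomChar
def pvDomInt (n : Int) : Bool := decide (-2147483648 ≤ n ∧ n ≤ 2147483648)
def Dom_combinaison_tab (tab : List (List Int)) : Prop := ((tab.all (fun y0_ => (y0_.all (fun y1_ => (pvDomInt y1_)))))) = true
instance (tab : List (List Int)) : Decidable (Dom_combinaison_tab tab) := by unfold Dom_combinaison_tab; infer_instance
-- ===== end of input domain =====

-- B replaces A's pop/replicate/modular-patch recursion by one left fold that extends every partial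
-- combination with the two choices of the next pair (same return value; note A mutates tab in place —
-- it pops all but its last pair — while B does not mutate: the equivalence proved is about the RETURN value).

-- ===== PORT A =====
def combinaison_tab : List (List Int) → List (List Int)
  | [] => [[]]
  | [p] => [[PySem.List.pyGetD p 0 0], [PySem.List.pyGetD p 1 0]]
  | v1 :: q :: rs =>
    let rest := q :: rs
    let n := rest.length
    let new_tab := (List.range (2 ^ n)).map (fun _ => [PySem.List.pyGetD v1 0 0])
                 ++ (List.range (2 ^ n)).map (fun _ => [PySem.List.pyGetD v1 1 0])
    let rec_tab := combinaison_tab rest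
    new_tab.mapIdx (fun i row => row ++ PySem.List.pyGetD rec_tab ((i : Int) % ((2 : Int) ^ n)) [])


-- ===== PORT B =====
def combinaison_tab_alt (tab : List (List Int)) : List (List Int) :=
  tab.foldl
    (fun result pair =>
      result.flatMap (fun r =>
        [r ++ [PySem.List.pyGetD pair 0 0], r ++ [PySem.List.pyGetD pair 1 0]]))
    [[]]

-- ===== PRECONDITION & SPEC =====
-- Pre_: Python A raises IndexError when some pair has fewer than two elements (B raises there too).
def Pre_combinaison_tab (tab : List (List Int)) : Prop := ∀ p ∈ tab, 2 ≤ p.length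
instance (tab : List (List Int)) : Decidable (Pre_combinaison_tab tab) := by
  unfold Pre_combinaison_tab; infer_instance

def pvWitness_combinaison_tab : List (List Int) := [[1, 2], [3, 4]]

def Spec_combinaison_tab (tab : List (List Int)) (out : List (List Int)) : Prop :=
  out = combinaison_tab_alt tab
instance (tab : List (List Int)) (out : List (List Int)) : Decidable (Spec_combinaison_tab tab out) := by
  unfold Spec_combinaison_tab; infer_instance

-- ===== CLAIM (what is proved, stated in full; the proofs are below) =====
def Claim_equal_combinaison_tab : Prop :=
  ∀ (tab : List (List Int)), Dom_combinaison_tab tab → Pre_combinaison_tab tab →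
    Spec_combinaison_tab tab (combinaison_tab tab)

-- ===== LEMMAS AND PROOFS =====

-- the MSB-first product of the pairs, as a structural recursion: the reference form both ports equal
def pvProd : List (List Int) → List (List Int)
  | [] => [[]]
  | p :: t =>
      (pvProd t).map (fun r => PySem.List.pyGetD p 0 0 :: r)
      ++ (pvProd t).map (fun r => PySem.List.pyGetD p 1 0 :: r)


theorem foldl_prod (t : List (List Int)) : ∀ acc : List (List Int),
    t.foldl (fun result pair =>
      result.flatMap (fun r =>
        [r ++ [PySem.List.pyGetD pair 0 0], r ++ [PySem.List.pyGetD pair 1 0]])) acc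
    = acc.flatMap (fun r => (pvProd t).map (fun s => r ++ s)) := by
  induction t with
  | nil => intro acc; simp [pvProd]
  | cons p t ih =>
    intro acc
    rw [List.foldl_cons, ih]
    rw [List.flatMap_assoc]
    simp [pvProd, List.flatMap_cons, List.map_map, Function.comp_def, List.append_assoc]


theorem pvProd_length (t : List (List Int)) : (pvProd t).length = 2 ^ t.length := by
  induction t with
  | nil => simp [pvProd]
  | cons p t ih => simp [pvProd, ih]; ring

theorem portA_eq_pvProd (tab : List (List Int)) : combinaison_tab tab = pvProd tab := by
  induction tab with
  | nil => simp [combinaison_tab, pvProd]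
  | cons v1 rest ih =>
    cases rest with
    | nil => simp [combinaison_tab, pvProd]
    | cons q rs =>
      rw [combinaison_tab]
      set m := 2 ^ (q :: rs).length with hm
      have hmpos : 0 < m := Nat.pow_pos (by norm_num)
      have h2e : m = 2 ^ (rs.length + 1) := by rw [hm]; simp
      have hlen : (combinaison_tab (q :: rs)).length = m := by
        rw [ih, pvProd_length, hm]
      have hcast : ((2 : Int) ^ (q :: rs).length) = (m : Int) := by push_cast [hm]; ring
      rw [show pvProd (v1 :: q :: rs)
            = (pvProd (q :: rs)).map (fun r => PySem.List.pyGetD v1 0 0 :: r)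
              ++ (pvProd (q :: rs)).map (fun r => PySem.List.pyGetD v1 1 0 :: r) from rfl]
      apply List.ext_getElem
      · simp [pvProd_length, hm, pow_succ]
      · intro i h1 h2
        simp only [List.getElem_mapIdx]
        by_cases hi : i < m
        · rw [List.getElem_append_left (by simpa using hi)]
          have hmod : ((i : Int) % ((2 : Int) ^ (q :: rs).length)) = (i : Int) := by
            rw [hcast]; exact Int.emod_eq_of_lt (by positivity) (by exact_mod_cast hi)
          have hbound : ((i : Int)) < ((combinaison_tab (q :: rs)).length : Int) := by
            rw [hlen]; exact_mod_cast hi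
          have hR1 : i < ((pvProd (q :: rs)).map
              (fun r => PySem.List.pyGetD v1 0 0 :: r)).length := by
            simp [pvProd_length]; omega
          rw [hmod, PySem.List.pyGetD_eq_getElem _ _ (by positivity) hbound,
            List.getElem_append_left hR1]
          simp [ih]
        · have hi2 : i < m + m := by
            simpa using h1
          have hmod : ((i : Int) % ((2 : Int) ^ (q :: rs).length)) = ((i - m : Nat) : Int) := by
            rw [hcast]
            have e1 : (i : Int) = ((i : Int) - m) + (m : Int) * 1 := by ring
            rw [e1, Int.add_mul_emod_self_left, Int.emod_eq_of_lt (by omega) (by omega)]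
            omega
          rw [List.getElem_append_right (by simpa using hi)]
          have hbound : (((i - m : Nat) : Int)) < ((combinaison_tab (q :: rs)).length : Int) := by
            rw [hlen]; omega
          have hR2 : ((pvProd (q :: rs)).map
              (fun r => PySem.List.pyGetD v1 0 0 :: r)).length ≤ i := by
            simp [pvProd_length]; omega
          rw [hmod, PySem.List.pyGetD_eq_getElem _ _ (by positivity) hbound,
            List.getElem_append_right hR2]
          simp only [ih, List.singleton_append, List.getElem_map, List.length_map,
            Int.toNat_natCast]
          congr 2
          rw [pvProd_length, ← hm]

theorem portB_eq_pvProd (tab : List (List Int)) : combinaison_tab_alt tab = pvProd tab := by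
  unfold combinaison_tab_alt
  rw [foldl_prod]
  simp

-- ===== VERDICT (by name: the statement is the Claim_ definition above) =====
theorem combinaison_tab_spec : Claim_equal_combinaison_tab := by
  intro tab _ _
  unfold Spec_combinaison_tab
  rw [portA_eq_pvProd, portB_eq_pvProd]
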